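-- pv_equiv track=rewrite | github.com/AdamZhouSE/pythonHomework | Code/CodeRecords/2607/61053/268505.py | legal
-- ===== SOURCE A (Python) =====
-- def legal(str):
--     if len(str)%3 != 0:
--         return False
--     i=j=k=0
--     for ch in str:
--         if ch == '0':
--             i += 1
--         elif ch == '1':
--             j+= 1
--         else:
--             k += 1
--     return i == j and j == k
-- ===== SOURCE B (Python) =====
-- def legal(str):
--     chars = list(str)
--     while chars:
--         if '0' not in chars or '1' not in chars:
--             return False
--         chars.remove('0')
--         chars.remove('1')
--         for idx, ch in enumerate(chars):
--             if ch != '0' and ch != '1':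
--                 del chars[idx]
--                 break
--         else:
--             return False
--     return True
-- ===== Notes on version B (the rewrite author's own statement) =====
-- stated objective: alternative
-- what changed: Replaces the single-pass three-accumulator counting loop (and its length-mod-3 guard) with a cancellation algorithm: repeatedly remove one zero character, one one character and one other character from a working list until it is empty, failing whenever one of the three classes is exhausted.
import Mathlib
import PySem

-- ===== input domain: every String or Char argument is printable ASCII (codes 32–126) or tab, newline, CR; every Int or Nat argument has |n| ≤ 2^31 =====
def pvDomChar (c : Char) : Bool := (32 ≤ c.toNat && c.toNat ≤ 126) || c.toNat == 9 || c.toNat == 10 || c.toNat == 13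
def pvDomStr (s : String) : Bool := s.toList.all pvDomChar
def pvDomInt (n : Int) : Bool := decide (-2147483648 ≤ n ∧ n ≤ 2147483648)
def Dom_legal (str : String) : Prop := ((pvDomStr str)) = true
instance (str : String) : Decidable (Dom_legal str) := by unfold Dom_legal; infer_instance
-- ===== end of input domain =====

-- B replaces A's single-pass three-accumulator counting loop (and its len%3 guard) with a
-- cancellation algorithm that repeatedly removes one '0', one '1' and one other character;
-- an alternative of different structure, not claimed faster.


-- ===== PORT A =====
def legal (str : String) : Bool :=
  if PySem.Int.mod (PySem.Str.len str) 3 ≠ 0 then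
    false
  else
    let s := str.toList.foldl
      (fun (s : Int × Int × Int) ch =>
        if ch = '0' then (s.1 + 1, s.2.1, s.2.2)
        else if ch = '1' then (s.1, s.2.1 + 1, s.2.2)
        else (s.1, s.2.1, s.2.2 + 1))
      (0, 0, 0)
    s.1 == s.2.1 && s.2.1 == s.2.2

-- ===== PORT B =====
-- the 'for idx, ch in enumerate(chars): … del chars[idx]; break / else: return False' loop:
-- delete the first character that is neither '0' nor '1', none = the for-else fires.
def removeOther : List Char → Option (List Char)
  | [] => none
  | c :: rest =>
      if c ≠ '0' ∧ c ≠ '1' then some rest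
      else (removeOther rest).map (c :: ·)

theorem removeOther_length : ∀ (l l' : List Char), removeOther l = some l' → l'.length + 1 = l.length := by
  intro l
  induction l with
  | nil => intro l' h; simp [removeOther] at h
  | cons c rest ih =>
      intro l' h
      by_cases hc : c ≠ '0' ∧ c ≠ '1'
      · simp [removeOther, hc] at h; simp [← h]
      · simp only [removeOther, if_neg hc, Option.map_eq_some_iff] at h
        obtain ⟨t, ht, rfl⟩ := h
        simp [← ih t ht]

-- the while loop of Source B, on the working list
def legalLoop (chars : List Char) : Bool :=
  match h : chars with
  | [] => true
  | _ :: _ =>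
      if ('0' ∈ chars) ∧ ('1' ∈ chars) then
        let c1 := chars.erase '0'      -- chars.remove('0') after the membership check
        let c2 := c1.erase '1'         -- chars.remove('1')
        match h3 : removeOther c2 with
        | none => false
        | some c3 => legalLoop c3
      else false
termination_by chars.length
decreasing_by
  subst h
  rename_i hd tl hmem
  obtain ⟨h0, h1⟩ := hmem
  have e1 : ((hd :: tl).erase '0').length = (hd :: tl).length - 1 :=
    List.length_erase_of_mem h0
  have h1' : '1' ∈ (hd :: tl).erase '0' := (List.mem_erase_of_ne (by decide)).mpr h1
  have e2 : (((hd :: tl).erase '0').erase '1').length = ((hd :: tl).erase '0').length - 1 :=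
    List.length_erase_of_mem h1'
  have e3 := removeOther_length _ _ h3
  have h1pos : 0 < ((hd :: tl).erase '0').length := List.length_pos_of_mem h1'
  simp only [c2, c1] at e3
  simp only [List.length_cons] at *
  omega

def legal_alt (str : String) : Bool := legalLoop str.toList

-- ===== PRECONDITION & SPEC =====
def Spec_legal (str : String) (out : Bool) : Prop := out = legal_alt str
instance (str : String) (out : Bool) : Decidable (Spec_legal str out) := by unfold Spec_legal; infer_instance

-- ===== CLAIM (what is proved, stated in full; the proofs are below) =====
def Claim_equal_legal : Prop := ∀ (str : String), Dom_legal str → Spec_legal str (legal str)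

-- ===== LEMMAS AND PROOFS =====

-- number of characters that are neither '0' nor '1'
def cntOther (l : List Char) : Nat := l.countP (fun c => !(c == '0' || c == '1'))

theorem legalLoop_nil : legalLoop [] = true := by rw [legalLoop]

theorem legalLoop_cons (c : Char) (t : List Char) :
    legalLoop (c :: t) =
      (if ('0' ∈ c :: t) ∧ ('1' ∈ c :: t) then
        (removeOther (((c :: t).erase '0').erase '1')).elim false legalLoop
      else false) := by
  rw [legalLoop]
  by_cases hmem : ('0' ∈ c :: t) ∧ ('1' ∈ c :: t)
  · simp only [if_pos hmem]
    cases removeOther (((c :: t).erase '0').erase '1') <;> simp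
  · simp only [if_neg hmem]

theorem cntOther_cons_01 (c : Char) (t : List Char) (h : c = '0' ∨ c = '1') :
    cntOther (c :: t) = cntOther t := by
  rcases h with rfl | rfl <;> simp [cntOther]

theorem cntOther_cons_other (c : Char) (t : List Char) (h0 : c ≠ '0') (h1 : c ≠ '1') :
    cntOther (c :: t) = cntOther t + 1 := by
  simp [cntOther, h0, h1]

theorem removeOther_none (l : List Char) :
    removeOther l = none ↔ cntOther l = 0 := by
  induction l with
  | nil => simp [removeOther, cntOther]
  | cons c rest ih =>
      by_cases hc : c ≠ '0' ∧ c ≠ '1'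
      · simp only [removeOther, if_pos hc, cntOther, List.countP_cons]
        have : (!(c == '0' || c == '1')) = true := by
          simp [hc.1, hc.2]
        simp [this]
      · simp only [removeOther, if_neg hc, cntOther, List.countP_cons]
        have : (!(c == '0' || c == '1')) = false := by
          by_cases h0 : c = '0' <;> by_cases h1 : c = '1' <;> simp_all
        simp only [this, Option.map_eq_none_iff]
        exact ih

theorem removeOther_some (l : List Char) :
    ∀ l', removeOther l = some l' →
      l'.count '0' = l.count '0' ∧ l'.count '1' = l.count '1' ∧
      cntOther l' + 1 = cntOther l := by
  induction l with
  | nil => intro l' h; simp [removeOther] at h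
  | cons c rest ih =>
      intro l' h
      by_cases hc : c ≠ '0' ∧ c ≠ '1'
      · simp only [removeOther, if_pos hc, Option.some_inj] at h
        subst h
        refine ⟨?_, ?_, ?_⟩
        · simp [List.count_cons, (beq_eq_false_iff_ne.mpr (fun e => hc.1 e))]
        · simp [List.count_cons, (beq_eq_false_iff_ne.mpr (fun e => hc.2 e))]
        · rw [cntOther_cons_other c rest hc.1 hc.2]
      · simp only [removeOther, if_neg hc, Option.map_eq_some_iff] at h
        obtain ⟨t, ht, rfl⟩ := h
        obtain ⟨e0, e1, e2⟩ := ih t ht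
        have h01 : c = '0' ∨ c = '1' := by
          rcases Decidable.not_and_iff_not_or_not.mp hc with h0 | h1
          · exact Or.inl (not_not.mp h0)
          · exact Or.inr (not_not.mp h1)
        refine ⟨?_, ?_, ?_⟩
        · simp [List.count_cons, e0]
        · simp [List.count_cons, e1]
        · rw [cntOther_cons_01 c t h01, cntOther_cons_01 c rest h01]
          exact e2

theorem partition_count (l : List Char) :
    l.count '0' + l.count '1' + cntOther l = l.length := by
  induction l with
  | nil => simp [cntOther]
  | cons c rest ih =>
      simp only [List.count_cons, cntOther, List.countP_cons, List.length_cons]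
      simp only [cntOther] at ih
      by_cases h0 : c = '0' <;> by_cases h1 : c = '1' <;> simp_all <;> omega

theorem legalLoop_eq : ∀ (n : Nat) (l : List Char), l.length ≤ n →
    legalLoop l = decide (l.count '0' = l.count '1' ∧ l.count '1' = cntOther l) := by
  intro n
  induction n with
  | zero =>
      intro l h
      have : l = [] := List.eq_nil_of_length_eq_zero (Nat.le_zero.mp h)
      subst this
      simp [legalLoop_nil, cntOther]
  | succ n ih =>
      intro l hlen
      cases l with
      | nil => simp [legalLoop_nil, cntOther]
      | cons c t =>
        rw [legalLoop_cons]
        by_cases hmem : ('0' ∈ c :: t) ∧ ('1' ∈ c :: t)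
        · rw [if_pos hmem]
          obtain ⟨h0, h1⟩ := hmem
          have hp0 : List.Perm (c :: t) ('0' :: (c :: t).erase '0') := List.perm_cons_erase h0
          have h1e : '1' ∈ (c :: t).erase '0' := (List.mem_erase_of_ne (by decide)).mpr h1
          have hp1 : List.Perm ((c :: t).erase '0') ('1' :: ((c :: t).erase '0').erase '1') :=
            List.perm_cons_erase h1e
          set c2 := ((c :: t).erase '0').erase '1' with hc2
          have e00 : (c :: t).count '0' = c2.count '0' + 1 := by
            rw [hp0.count_eq, List.count_cons, hp1.count_eq, List.count_cons]
            simp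
          have e11 : (c :: t).count '1' = c2.count '1' + 1 := by
            rw [hp0.count_eq, List.count_cons, hp1.count_eq, List.count_cons]
            simp
          have eoo : cntOther (c :: t) = cntOther c2 := by
            simp only [cntOther]
            rw [hp0.countP_eq, List.countP_cons, hp1.countP_eq, List.countP_cons]
            simp
          cases h3 : removeOther c2 with
          | none =>
              have hz : cntOther c2 = 0 := (removeOther_none c2).mp h3
              have hne : ¬ ((c :: t).count '0' = (c :: t).count '1' ∧
                            (c :: t).count '1' = cntOther (c :: t)) := by
                intro ⟨_, hb⟩
                omega
              simp [hne]
          | some c3 =>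
              obtain ⟨f0, f1, f2⟩ := removeOther_some c2 c3 h3
              have hlc2 : c2.length + 2 = (c :: t).length := by
                have a1 : ((c :: t).erase '0').length = (c :: t).length - 1 :=
                  List.length_erase_of_mem h0
                have a2 : c2.length = ((c :: t).erase '0').length - 1 := by
                  rw [hc2]; exact List.length_erase_of_mem h1e
                have : 0 < ((c :: t).erase '0').length := List.length_pos_of_mem h1e
                have : 0 < (c :: t).length := List.length_pos_of_mem h0
                omega
              have hlc3 : c3.length + 1 = c2.length := removeOther_length _ _ h3
              have hc3n : c3.length ≤ n := by
                have : (c :: t).length ≤ n + 1 := hlen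
                omega
              simp only [Option.elim]
              rw [ih c3 hc3n]
              simp only [decide_eq_decide]
              constructor
              · intro ⟨ha, hb⟩
                omega
              · intro ⟨ha, hb⟩
                omega
        · rw [if_neg hmem]
          have hne : ¬ ((c :: t).count '0' = (c :: t).count '1' ∧
                     (c :: t).count '1' = cntOther (c :: t)) := by
            intro ⟨ha, hb⟩
            have hpart := partition_count (c :: t)
            have hlenpos : 0 < (c :: t).length := by simp
            rcases Decidable.not_and_iff_not_or_not.mp hmem with h0 | h1
            · have : (c :: t).count '0' = 0 := by
                simpa using List.count_eq_zero.mpr h0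
              omega
            · have : (c :: t).count '1' = 0 := by
                simpa using List.count_eq_zero.mpr h1
              omega
          simp [hne]

-- A's loop returns the three class counts (shifted by the accumulator).
theorem fold_counts (l : List Char) :
    ∀ (a b k : Int),
      l.foldl
        (fun (s : Int × Int × Int) ch =>
          if ch = '0' then (s.1 + 1, s.2.1, s.2.2)
          else if ch = '1' then (s.1, s.2.1 + 1, s.2.2)
          else (s.1, s.2.1, s.2.2 + 1))
        (a, b, k)
      = (a + l.count '0', b + l.count '1', k + cntOther l) := by
  induction l with
  | nil => intro a b k; simp [cntOther]
  | cons h t ih =>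
      intro a b k
      simp only [List.foldl_cons, List.count_cons, cntOther, List.countP_cons]
      simp only [cntOther] at ih
      by_cases h0 : h = '0'
      · subst h0
        rw [if_pos rfl, ih]
        have e1 : (('0' : Char) == '1') = false := by decide
        simp only [BEq.rfl, if_true, e1, Prod.mk.injEq]
        refine ⟨by push_cast; ring, by push_cast; ring, by simp⟩
      · rw [if_neg h0]
        have e0 : (h == '0') = false := beq_eq_false_iff_ne.mpr h0
        by_cases h1 : h = '1'
        · subst h1
          rw [if_pos rfl, ih]
          simp only [BEq.rfl, if_true, e0, Prod.mk.injEq]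
          refine ⟨by simp, by push_cast; ring, by simp⟩
        · rw [if_neg h1, ih]
          have e1 : (h == '1') = false := beq_eq_false_iff_ne.mpr h1
          simp only [e0, e1, Prod.mk.injEq]
          refine ⟨by simp, by simp, by simp only [Bool.or_self, Bool.not_false, if_true]; push_cast; ring⟩

-- ===== VERDICT (by name: the statement is the Claim_ definition above) =====
theorem legal_spec : Claim_equal_legal := by
  intro str _
  unfold Spec_legal legal legal_alt
  rw [legalLoop_eq str.toList.length str.toList le_rfl]
  simp only [PySem.Str.len, fold_counts str.toList 0 0 0, zero_add]
  set l := str.toList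
  set c0 := l.count '0' with hc0
  set c1 := l.count '1' with hc1
  set ck := cntOther l with hck
  have hpart := partition_count l
  by_cases hmod : PySem.Int.mod (l.length : Int) 3 ≠ 0
  · rw [if_pos hmod]
    by_cases hP : c0 = c1 ∧ c1 = ck
    · exfalso
      apply hmod
      have hlen : (l.length : Int) = 3 * (c1 : Int) := by omega
      simp [PySem.Int.mod, hlen, Int.fmod_eq_emod]
    · simp [hP]
  · rw [if_neg hmod]
    by_cases hP : c0 = c1 ∧ c1 = ck
    · have e1 : ((c0 : Int) == (c1 : Int)) = true := by simp [hP.1]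
      have e2 : ((c1 : Int) == (ck : Int)) = true := by simp [hP.2]
      simp [hP]
    · rcases Decidable.not_and_iff_not_or_not.mp hP with h | h
      · have : ((c0 : Int) == (c1 : Int)) = false := by simpa using h
        simp [this, hP]
      · have : ((c1 : Int) == (ck : Int)) = false := by simpa using h
        by_cases h01 : c0 = c1
        · simp [h01, this, h]
        · have : ((c0 : Int) == (c1 : Int)) = false := by simpa using h01
          simp [this, hP]
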